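-- pv_equiv track=rewrite | github.com/Dpm-a/Corpora-DNTs-Augmenting | src/merge_and_fast_align.py | find_equal_prefix
-- ===== SOURCE A (Python) =====
-- def find_equal_prefix(str1, str2):
--     equal_prefix = ""
--     for char1, char2 in zip(str1, str2):
--         if char1 == char2:
--             equal_prefix += char1
--         else:
--             break
--
--     last_slash_index = equal_prefix.rfind("/")
--     if last_slash_index != -1:
--         equal_prefix = equal_prefix[:last_slash_index+1]
--
--     return equal_prefix
-- ===== SOURCE B (Python) =====
-- def find_equal_prefix(str1, str2):
--     k = 0
--     last = -1
--     for c1, c2 in zip(str1, str2):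
--         if c1 != c2:
--             break
--         if c1 == '/':
--             last = k
--         k += 1
--     if last != -1:
--         return str1[:last + 1]
--     return str1[:k]
-- ===== Notes on version B (the rewrite author's own statement) =====
-- stated objective: alternative
-- what changed: Single pass over the zipped characters tracking the match length and the index of the last matching '/', replacing A's prefix-string accumulation followed by a separate rfind scan and slice of the built string.
import Mathlib
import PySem

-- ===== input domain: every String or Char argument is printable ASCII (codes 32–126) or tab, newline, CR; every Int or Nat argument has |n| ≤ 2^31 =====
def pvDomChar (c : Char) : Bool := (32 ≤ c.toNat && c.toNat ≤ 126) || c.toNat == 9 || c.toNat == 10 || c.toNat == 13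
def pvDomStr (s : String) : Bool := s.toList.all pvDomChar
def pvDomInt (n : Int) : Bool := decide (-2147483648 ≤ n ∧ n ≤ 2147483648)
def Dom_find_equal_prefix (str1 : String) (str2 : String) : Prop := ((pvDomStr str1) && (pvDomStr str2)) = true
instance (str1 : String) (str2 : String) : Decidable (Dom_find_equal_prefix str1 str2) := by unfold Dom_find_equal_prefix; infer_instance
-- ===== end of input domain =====

-- B replaces A's prefix-string building plus a second rfind pass by a single pass that
-- tracks the match length and the index of the last matching '/' (objective: alternative).

-- ===== PORT A =====
-- the for-loop over zip(str1, str2) with break, accumulating equal_prefix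
def fepA_loop : List (Char × Char) → List Char → List Char
  | [], acc => acc
  | (c1, c2) :: rest, acc => if c1 = c2 then fepA_loop rest (acc ++ [c1]) else acc

def find_equal_prefix (str1 : String) (str2 : String) : String :=
  let equal_prefix := fepA_loop (str1.toList.zip str2.toList) []
  let last_slash_index := PySem.Chars.rfind equal_prefix ['/']
  if last_slash_index ≠ -1 then
    String.ofList (PySem.List.slice equal_prefix none (some (last_slash_index + 1)))
  else
    String.ofList equal_prefix

-- ===== PORT B =====
-- the single pass: k = match length so far, last = index of last matching '/'
def fepB_loop : List (Char × Char) → Nat → Int → Nat × Int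
  | [], k, last => (k, last)
  | (c1, c2) :: rest, k, last =>
    if c1 ≠ c2 then (k, last)
    else fepB_loop rest (k + 1) (if c1 = '/' then (k : Int) else last)

def find_equal_prefix_alt (str1 : String) (str2 : String) : String :=
  let r := fepB_loop (str1.toList.zip str2.toList) 0 (-1)
  if r.2 ≠ -1 then
    String.ofList (PySem.List.slice str1.toList none (some (r.2 + 1)))
  else
    String.ofList (PySem.List.slice str1.toList none (some ((r.1 : Int))))

-- ===== PRECONDITION & SPEC =====
def Spec_find_equal_prefix (str1 : String) (str2 : String) (out : String) : Prop := out = find_equal_prefix_alt str1 str2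
instance (str1 : String) (str2 : String) (out : String) : Decidable (Spec_find_equal_prefix str1 str2 out) := by unfold Spec_find_equal_prefix; infer_instance

-- ===== CLAIM (what is proved, stated in full; the proofs are below) =====
def Claim_equal_find_equal_prefix : Prop := ∀ (str1 : String) (str2 : String), Dom_find_equal_prefix str1 str2 → Spec_find_equal_prefix str1 str2 (find_equal_prefix str1 str2)

-- ===== LEMMAS AND PROOFS =====

-- the matched common prefix of a zipped list
def pvMp : List (Char × Char) → List Char
  | [] => []
  | (c1, c2) :: rest => if c1 = c2 then c1 :: pvMp rest else []

-- index of the last '/' in a list of chars, none if absent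
def pvLlast : List Char → Option Nat
  | [] => none
  | c :: r => match pvLlast r with
    | some j => some (j + 1)
    | none => if c = '/' then some 0 else none

theorem fepA_loop_eq (l : List (Char × Char)) (acc : List Char) :
    fepA_loop l acc = acc ++ pvMp l := by
  induction l generalizing acc with
  | nil => simp [fepA_loop, pvMp]
  | cons p rest ih =>
    obtain ⟨c1, c2⟩ := p
    by_cases h : c1 = c2 <;> simp [fepA_loop, pvMp, h, ih]

theorem fepB_loop_eq (l : List (Char × Char)) (k : Nat) (last : Int) :
    fepB_loop l k last = (k + (pvMp l).length,
      match pvLlast (pvMp l) with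
      | some j => ((k + j : Nat) : Int)
      | none => last) := by
  induction l generalizing k last with
  | nil => simp [fepB_loop, pvMp, pvLlast]
  | cons p rest ih =>
    obtain ⟨c1, c2⟩ := p
    by_cases h : c1 = c2
    · subst h
      rw [show fepB_loop ((c1, c1) :: rest) k last
            = fepB_loop rest (k + 1) (if c1 = '/' then (k : Int) else last) from by
          simp [fepB_loop]]
      rw [ih]
      rw [show pvMp ((c1, c1) :: rest) = c1 :: pvMp rest from by simp [pvMp]]
      cases hl : pvLlast (pvMp rest) with
      | none =>
        rw [show pvLlast (c1 :: pvMp rest)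
              = if c1 = '/' then some 0 else none from by simp [pvLlast, hl]]
        by_cases hs : c1 = '/' <;> simp [hs, Prod.ext_iff] <;> omega
      | some j =>
        rw [show pvLlast (c1 :: pvMp rest) = some (j + 1) from by simp [pvLlast, hl]]
        simp only [Prod.mk.injEq, List.length_cons]
        exact ⟨by omega, by push_cast; ring⟩
    · simp [fepB_loop, h, pvMp, pvLlast]

theorem pvLlast_snoc (l : List Char) (c : Char) :
    pvLlast (l ++ [c]) = if c = '/' then some l.length else pvLlast l := by
  induction l with
  | nil => by_cases h : c = '/' <;> simp [pvLlast, h]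
  | cons d r ih =>
    simp only [List.cons_append, pvLlast, ih]
    by_cases h : c = '/'
    · simp [h]
    · simp [h]

theorem pvLlast_take_succ (p : List Char) (m : Nat) :
    pvLlast (p.take (m + 1)) =
      match p[m]? with
      | some c => if c = '/' then some m else pvLlast (p.take m)
      | none => pvLlast (p.take m) := by
  cases h : p[m]? with
  | some c =>
    obtain ⟨hm, _⟩ := List.getElem?_eq_some_iff.1 h
    have ht : p.take (m + 1) = p.take m ++ [c] := by
      rw [List.take_succ, h]; rfl
    rw [ht, pvLlast_snoc]
    simp [List.length_take, Nat.min_eq_left (by omega : m ≤ p.length)]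
  | none =>
    have hm : p.length ≤ m := List.getElem?_eq_none_iff.1 h
    simp [List.take_of_length_le (by omega : p.length ≤ m + 1),
          List.take_of_length_le hm]

theorem slash_isPrefixOf_drop (p : List Char) (j : Nat) :
    (['/'].isPrefixOf (p.drop j)) = true ↔ p[j]? = some '/' := by
  have hidx : p[j]? = (p.drop j)[0]? := by simp
  cases h : p.drop j with
  | nil => simp [List.isPrefixOf, hidx, h]
  | cons c t =>
    rw [hidx, h]
    simp only [List.isPrefixOf, Bool.and_true,
      beq_iff_eq, List.getElem?_cons_zero, Option.some.injEq]
    exact eq_comm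

theorem rfind_go_eq (p : List Char) (n : Nat) :
    PySem.Chars.rfind.go p ['/'] n =
      match pvLlast (p.take (n + 1)) with
      | some j => (j : Int)
      | none => -1 := by
  induction n with
  | zero =>
    cases p with
    | nil => simp [PySem.Chars.rfind.go, List.isPrefixOf, pvLlast]
    | cons c t =>
      have hpre : (['/'].isPrefixOf (c :: t)) = true ↔ c = '/' := by
        have := slash_isPrefixOf_drop (c :: t) 0
        simpa using this
      by_cases hs : c = '/'
      · rw [PySem.Chars.rfind.go]
        simp [pvLlast, hs]
      · rw [PySem.Chars.rfind.go]
        have : ¬ (['/'].isPrefixOf (c :: t)) = true := fun hc => hs (hpre.1 hc)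
        simp [this, pvLlast, hs]
  | succ n ih =>
    rw [PySem.Chars.rfind.go]
    rw [pvLlast_take_succ p (n + 1)]
    cases h : p[n + 1]? with
    | some c =>
      by_cases hs : c = '/'
      · have : ['/'].isPrefixOf (p.drop (n + 1)) = true :=
          (slash_isPrefixOf_drop p (n + 1)).2 (by rw [h, hs])
        simp [this, hs]
      · have : ¬ ['/'].isPrefixOf (p.drop (n + 1)) = true := by
          rw [slash_isPrefixOf_drop, h]
          simp [hs]
        simp [this, hs, ih]
    | none =>
      have : ¬ ['/'].isPrefixOf (p.drop (n + 1)) = true := by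
        rw [slash_isPrefixOf_drop, h]; simp
      simp [this, ih]

theorem rfind_slash_eq (p : List Char) :
    PySem.Chars.rfind p ['/'] =
      match pvLlast p with
      | some j => (j : Int)
      | none => -1 := by
  rw [PySem.Chars.rfind, rfind_go_eq, List.take_of_length_le (by omega)]

theorem pvLlast_lt (p : List Char) (j : Nat) (h : pvLlast p = some j) : j < p.length := by
  induction p generalizing j with
  | nil => simp [pvLlast] at h
  | cons c r ih =>
    simp only [pvLlast] at h
    cases hl : pvLlast r with
    | some i =>
      rw [hl] at h
      have := ih i hl
      simp at h
      simp [← h]; omega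
    | none =>
      rw [hl] at h
      by_cases hs : c = '/' <;> simp [hs] at h
      simp [← h]

theorem take_eq_mp_take (l1 l2 : List Char) (n : Nat)
    (h : n ≤ (pvMp (l1.zip l2)).length) :
    l1.take n = (pvMp (l1.zip l2)).take n := by
  induction l1 generalizing l2 n with
  | nil => simp [pvMp]
  | cons a t1 ih =>
    cases l2 with
    | nil =>
      simp [pvMp] at h
      simp [h]
    | cons b t2 =>
      by_cases hab : a = b
      · cases n with
        | zero => simp
        | succ m =>
          simp only [List.zip_cons_cons, pvMp, if_pos hab] at h ⊢
          simp only [List.take_succ_cons]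
          rw [ih t2 m (by simpa using h)]
      · simp [pvMp, hab] at h
        simp [h]

theorem find_equal_prefix_eq_alt (str1 str2 : String) :
    find_equal_prefix str1 str2 = find_equal_prefix_alt str1 str2 := by
  unfold find_equal_prefix find_equal_prefix_alt
  simp only [fepA_loop_eq, List.nil_append, fepB_loop_eq, rfind_slash_eq, Nat.zero_add]
  cases h : pvLlast (pvMp (str1.toList.zip str2.toList)) with
  | none =>
    rw [if_neg (by simp), if_neg (by simp)]
    rw [PySem.List.slice_to_natCast]
    rw [take_eq_mp_take str1.toList str2.toList _ (le_refl _), List.take_length]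
  | some j =>
    have hne : (j : Int) ≠ -1 := by omega
    rw [if_pos hne, if_pos hne]
    rw [show ((j : Int) + 1) = (((j + 1 : Nat)) : Int) from by push_cast; ring]
    rw [PySem.List.slice_to_natCast, PySem.List.slice_to_natCast]
    rw [take_eq_mp_take str1.toList str2.toList (j + 1)
          (by have := pvLlast_lt _ _ h; omega)]

-- ===== VERDICT (by name: the statement is the Claim_ definition above) =====
theorem find_equal_prefix_spec : Claim_equal_find_equal_prefix := by
  intro str1 str2 _
  unfold Spec_find_equal_prefix
  exact find_equal_prefix_eq_alt str1 str2
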